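-- pv_equiv track=rewrite | github.com/Omnarayanpatel/Dhriti.AI | Dhriti_ai-backend/app/services/task_ingest.py | order_columns
-- ===== SOURCE A (Python) =====
-- from typing import Any, Dict, Iterable, Iterator, List, Optional, Sequence, Tuple
--
-- def order_columns(flat_rows: Sequence[Dict[str, Any]]) -> List[str]:
--     if not flat_rows:
--         return []
--     seen: Dict[str, None] = {}
--     for row in flat_rows:
--         for key in row.keys():
--             seen.setdefault(str(key), None)
--
--     ordered = list(seen.keys())
--     priority = [
--         "id",
--         "task_id",
--         "taskId",
--         "external_id",
--         "externalId",
--         "title",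
--         "name",
--         "file",
--         "file_name",
--         "fileName",
--         "media.url",
--     ]
--     prioritized = [key for key in priority if key in ordered]
--     remainder = [key for key in ordered if key not in prioritized]
--     return prioritized + remainder
-- ===== SOURCE B (Python) =====
-- # Single-pass bucket placement: a rank table maps each priority key to its bucket;
-- # each first-seen key goes straight into its bucket, concatenated at the end.
-- def order_columns(flat_rows):
--     priority = [
--         "id", "task_id", "taskId", "external_id", "externalId",
--         "title", "name", "file", "file_name", "fileName", "media.url",
--     ]
--     n = len(priority)
--     rank = {k: i for i, k in enumerate(priority)}
--     buckets = [[] for _ in range(n + 1)]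
--     seen = set()
--     for row in flat_rows:
--         for key in row.keys():
--             k = str(key)
--             if k not in seen:
--                 seen.add(k)
--                 buckets[rank.get(k, n)].append(k)
--     out = []
--     for b in buckets:
--         out += b
--     return out
-- ===== Notes on version B (the rewrite author's own statement) =====
-- stated objective: alternative
-- what changed: A scans all rows into an order-preserving dict and then makes two more passes (a comprehension over the priority list and a membership-filter pass over the collected keys, with a list-membership test against prioritized inside it); B instead builds a rank table from the priority list once and, in a single scan, drops each first-seen key directly into the bucket of its rank (last bucket = non-priority), returning the buckets' concatenation.
import Mathlib
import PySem

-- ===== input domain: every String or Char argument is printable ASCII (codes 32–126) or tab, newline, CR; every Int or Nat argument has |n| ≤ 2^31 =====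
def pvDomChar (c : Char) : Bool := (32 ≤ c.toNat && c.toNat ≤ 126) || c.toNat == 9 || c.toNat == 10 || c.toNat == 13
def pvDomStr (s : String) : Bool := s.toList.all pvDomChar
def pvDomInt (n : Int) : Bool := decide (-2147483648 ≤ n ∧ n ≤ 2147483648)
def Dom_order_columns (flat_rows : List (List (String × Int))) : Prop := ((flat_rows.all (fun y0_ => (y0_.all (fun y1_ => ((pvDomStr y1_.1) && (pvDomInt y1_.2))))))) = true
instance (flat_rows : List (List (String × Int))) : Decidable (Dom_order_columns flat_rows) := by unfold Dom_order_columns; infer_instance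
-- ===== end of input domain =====

-- B re-implements A's two-pass "collect keys, then partition by a priority list" as a
-- single pass that drops each first-seen key directly into its rank bucket (alternative
-- decomposition, same cost class). Return values only; neither program mutates its input.

-- the priority list, shared literal of both Pythons
def pvPriority : List String :=
  ["id", "task_id", "taskId", "external_id", "externalId", "title",
   "name", "file", "file_name", "fileName", "media.url"]

-- ===== PORT A =====
-- dict keys are typed str here, so Python's str(key) is the identity and is dropped.
def order_columns (flat_rows : List (List (String × Int))) : List String :=
  if flat_rows = [] then []
  else
    let seen : PySem.Dict String (Option Unit) :=
      flat_rows.foldl (fun d row => row.foldl (fun d kv => d.setdefault kv.1 none) d)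
        PySem.Dict.empty
    let ordered := seen.keys
    let prioritized := pvPriority.filter (fun key => ordered.contains key)
    let remainder := ordered.filter (fun key => !(prioritized.contains key))
    prioritized ++ remainder

-- ===== PORT B =====
-- rank = {k: i for i, k in enumerate(priority)}
def pvRank : PySem.Dict String Int :=
  PySem.Dict.ofList ((PySem.List.enumerate pvPriority).map (fun p => (p.2, p.1)))

-- buckets[i].append(k); the index i = rank.get(k, n) is always in [0, n], so toNat is exact
def pvAppendAt (bs : List (List String)) (i : Int) (k : String) : List (List String) :=
  bs.set i.toNat ((bs.getD i.toNat []) ++ [k])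

-- loop body: if k not in seen: seen.add(k); buckets[rank.get(k, n)].append(k)
def pvStepB (st : PySem.Set String × List (List String)) (k : String) :
    PySem.Set String × List (List String) :=
  if !(PySem.Set.contains st.1 k) then
    (PySem.Set.add st.1 k, pvAppendAt st.2 (pvRank.getD k (pvPriority.length : Int)) k)
  else st

def order_columns_alt (flat_rows : List (List (String × Int))) : List String :=
  let buckets : List (List String) := List.replicate (pvPriority.length + 1) []
  let st := flat_rows.foldl (fun st row => row.foldl (fun st kv => pvStepB st kv.1) st)
    (PySem.Set.empty, buckets)
  st.2.foldl (fun out b => out ++ b) []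

-- ===== PRECONDITION & SPEC =====
def Spec_order_columns (flat_rows : List (List (String × Int))) (out : List String) : Prop := out = order_columns_alt flat_rows
instance (flat_rows : List (List (String × Int))) (out : List String) : Decidable (Spec_order_columns flat_rows out) := by unfold Spec_order_columns; infer_instance

-- ===== CLAIM (what is proved, stated in full; the proofs are below) =====
def Claim_equal_order_columns : Prop := ∀ (flat_rows : List (List (String × Int))), Dom_order_columns flat_rows → Spec_order_columns flat_rows (order_columns flat_rows)

-- ===== LEMMAS AND PROOFS =====

-- the stringified keys of all rows, in scan order
def pvKeys (flat_rows : List (List (String × Int))) : List String :=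
  flat_rows.flatMap (fun row => row.map Prod.fst)

-- proof-side description of B's bucket list after the first-seen keys l have been placed
def pvBucketsOf (l : List String) : List (List String) :=
  pvPriority.map (fun p => l.filter (fun k => k == p)) ++
    [l.filter (fun k => !(pvPriority.contains k))]

-- a nested row/key loop is a loop over the flattened key list
theorem pv_foldl_rows {σ : Type} (f : σ → String → σ) (rows : List (List (String × Int)))
    (init : σ) :
    rows.foldl (fun s row => row.foldl (fun s kv => f s kv.1) s) init =
      (pvKeys rows).foldl f init := by
  induction rows generalizing init with
  | nil => rfl
  | cons r t ih => simp [pvKeys, List.foldl_append, List.foldl_map, ih]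

-- pv_foldl_rows specialised to A's setdefault loop (beta-reduced form for rw)
theorem pv_foldl_rows_A (rows : List (List (String × Int))) (d0 : PySem.Dict String (Option Unit)) :
    rows.foldl (fun d row => row.foldl (fun d kv => d.setdefault kv.1 none) d) d0 =
      (pvKeys rows).foldl (fun d k => d.setdefault k none) d0 :=
  pv_foldl_rows (fun d k => d.setdefault k none) rows d0

-- A's dict loop: keys of the setdefault fold = ordered dedup
theorem pv_keys_fold_setdefault (ks : List String) (d : PySem.Dict String (Option Unit)) :
    (ks.foldl (fun d k => d.setdefault k none) d).keys = PySem.Set.update d.keys ks := by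
  induction ks generalizing d with
  | nil => simp [PySem.Set.update]
  | cons k t ih =>
    rw [List.foldl_cons, PySem.Set.update_cons, ih]
    congr 1
    rw [PySem.Dict.keys_setdefault, PySem.Set.add_eq_ite]
    by_cases h : k ∈ d.keys
    · simp [h, (PySem.Dict.contains_iff_mem_keys d k).2 h]
    · have hc : d.contains k = false := by
        rw [← Bool.not_eq_true, PySem.Dict.contains_iff_mem_keys]; exact h
      simp [h, hc]

theorem pv_rank_getD_of_not_mem (k : String) (h : k ∉ pvPriority) :
    pvRank.getD k (pvPriority.length : Int) = 11 := by
  have hm : pvRank = PySem.Dict.mk [("id",0),("task_id",1),("taskId",2),("external_id",3),("externalId",4),("title",5),("name",6),("file",7),("file_name",8),("fileName",9),("media.url",10)] := by rfl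
  simp only [pvPriority, List.mem_cons, not_or] at h
  obtain ⟨n1,n2,n3,n4,n5,n6,n7,n8,n9,n10,n11,-⟩ := h
  rw [hm]
  simp [PySem.Dict.getD, Ne.symm n1, Ne.symm n2, Ne.symm n3,
    Ne.symm n4, Ne.symm n5, Ne.symm n6, Ne.symm n7, Ne.symm n8, Ne.symm n9, Ne.symm n10,
    Ne.symm n11, pvPriority, PySem.Dict.get?]

theorem pv_push_bucketsOf (l : List String) (k : String) :
    pvAppendAt (pvBucketsOf l) (pvRank.getD k (pvPriority.length : Int)) k
      = pvBucketsOf (l ++ [k]) := by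
  by_cases hk : k ∈ pvPriority
  · have hcases : k = "id" ∨ k = "task_id" ∨ k = "taskId" ∨ k = "external_id" ∨
        k = "externalId" ∨ k = "title" ∨ k = "name" ∨ k = "file" ∨ k = "file_name" ∨
        k = "fileName" ∨ k = "media.url" := by simpa [pvPriority] using hk
    rcases hcases with rfl|rfl|rfl|rfl|rfl|rfl|rfl|rfl|rfl|rfl|rfl
    · rw [show pvRank.getD "id" (pvPriority.length : Int) = 0 from rfl]
      simp [pvAppendAt, pvBucketsOf, pvPriority, List.filter_append]
    · rw [show pvRank.getD "task_id" (pvPriority.length : Int) = 1 from rfl]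
      simp [pvAppendAt, pvBucketsOf, pvPriority, List.filter_append]
    · rw [show pvRank.getD "taskId" (pvPriority.length : Int) = 2 from rfl]
      simp [pvAppendAt, pvBucketsOf, pvPriority, List.filter_append]
    · rw [show pvRank.getD "external_id" (pvPriority.length : Int) = 3 from rfl]
      simp [pvAppendAt, pvBucketsOf, pvPriority, List.filter_append]
    · rw [show pvRank.getD "externalId" (pvPriority.length : Int) = 4 from rfl]
      simp [pvAppendAt, pvBucketsOf, pvPriority, List.filter_append]
    · rw [show pvRank.getD "title" (pvPriority.length : Int) = 5 from rfl]
      simp [pvAppendAt, pvBucketsOf, pvPriority, List.filter_append]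
    · rw [show pvRank.getD "name" (pvPriority.length : Int) = 6 from rfl]
      simp [pvAppendAt, pvBucketsOf, pvPriority, List.filter_append]
    · rw [show pvRank.getD "file" (pvPriority.length : Int) = 7 from rfl]
      simp [pvAppendAt, pvBucketsOf, pvPriority, List.filter_append]
    · rw [show pvRank.getD "file_name" (pvPriority.length : Int) = 8 from rfl]
      simp [pvAppendAt, pvBucketsOf, pvPriority, List.filter_append]
    · rw [show pvRank.getD "fileName" (pvPriority.length : Int) = 9 from rfl]
      simp [pvAppendAt, pvBucketsOf, pvPriority, List.filter_append]
    · rw [show pvRank.getD "media.url" (pvPriority.length : Int) = 10 from rfl]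
      simp [pvAppendAt, pvBucketsOf, pvPriority, List.filter_append]
  · rw [pv_rank_getD_of_not_mem k hk]
    simp only [pvPriority, List.mem_cons, not_or] at hk
    obtain ⟨n1,n2,n3,n4,n5,n6,n7,n8,n9,n10,n11,-⟩ := hk
    simp [pvAppendAt, pvBucketsOf, pvPriority, List.filter_append, n1, n2, n3, n4, n5, n6,
      n7, n8, n9, n10, n11]

theorem pv_foldB (ks : List String) (l : List String) :
    ks.foldl pvStepB (l, pvBucketsOf l) =
      (PySem.Set.update l ks, pvBucketsOf (PySem.Set.update l ks)) := by
  induction ks generalizing l with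
  | nil => simp [PySem.Set.update]
  | cons k t ih =>
    rw [List.foldl_cons, PySem.Set.update_cons]
    by_cases hk : k ∈ l
    · have hstep : pvStepB (l, pvBucketsOf l) k = (l, pvBucketsOf l) := by
        simp [pvStepB, hk]
      rw [hstep, PySem.Set.add_of_mem hk, ih]
    · have hstep : pvStepB (l, pvBucketsOf l) k = (l ++ [k], pvBucketsOf (l ++ [k])) := by
        simp [pvStepB, hk, pv_push_bucketsOf]
      rw [hstep, PySem.Set.add_of_not_mem hk, ih]

theorem pv_filter_eq_single (ord : List String) (h : ord.Nodup) (p : String) :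
    ord.filter (fun k => k == p) = if p ∈ ord then [p] else [] := by
  by_cases hp : p ∈ ord <;>
    simp [List.filter_beq, hp, List.count_eq_one_of_mem, List.count_eq_zero_of_not_mem, h]

theorem pv_filter_eq_flatMap {α : Type} (l : List α) (p : α → Bool) :
    l.filter p = l.flatMap (fun x => if p x then [x] else []) := by
  induction l with
  | nil => rfl
  | cons x t ih => by_cases hx : p x <;> simp [hx, ih]

theorem pv_flatten_buckets (ord : List String) (h : ord.Nodup) :
    (pvBucketsOf ord).foldl (fun out b => out ++ b) [] =
      pvPriority.filter (fun key => ord.contains key) ++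
        ord.filter (fun key => !((pvPriority.filter (fun key => ord.contains key)).contains key)) := by
  rw [PySem.List.foldl_append_eq_flatten]
  simp only [List.nil_append, pvBucketsOf, List.flatten_append, List.flatten_cons,
    List.flatten_nil, List.append_nil, ← List.flatMap_def]
  have h1 : pvPriority.flatMap (fun p => ord.filter (fun k => k == p))
      = pvPriority.filter (fun key => ord.contains key) := by
    rw [pv_filter_eq_flatMap]
    simp only [pv_filter_eq_single ord h]
    simp
  have h2 : ord.filter (fun k => !(pvPriority.contains k))
      = ord.filter (fun key => !((pvPriority.filter (fun key => ord.contains key)).contains key)) := by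
    apply List.filter_congr
    intro k hk
    simp [List.mem_filter, hk]
  rw [h1, h2]

-- ===== VERDICT (by name: the statement is the Claim_ definition above) =====
theorem order_columns_spec : Claim_equal_order_columns := by
  intro flat_rows _
  unfold Spec_order_columns order_columns order_columns_alt
  have hB : (flat_rows.foldl (fun st row => row.foldl (fun st kv => pvStepB st kv.1) st)
      (PySem.Set.empty, List.replicate (pvPriority.length + 1) ([] : List String))).2.foldl
        (fun out b => out ++ b) []
      = pvPriority.filter (fun key => (PySem.Set.ofList (pvKeys flat_rows)).contains key) ++
          (PySem.Set.ofList (pvKeys flat_rows)).filter (fun key =>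
            !((pvPriority.filter (fun key => (PySem.Set.ofList (pvKeys flat_rows)).contains key)).contains key)) := by
    rw [pv_foldl_rows pvStepB]
    rw [show (PySem.Set.empty, List.replicate (pvPriority.length + 1) ([] : List String))
        = (([] : List String), pvBucketsOf []) from rfl]
    rw [pv_foldB, PySem.Set.update_nil_left]
    exact pv_flatten_buckets _ (PySem.Set.nodup_ofList _)
  by_cases he : flat_rows = []
  · subst he
    rw [if_pos rfl, hB]
    simp [pvKeys]
  · simp only [if_neg he]
    rw [pv_foldl_rows_A, pv_keys_fold_setdefault,
      PySem.Dict.keys_empty, PySem.Set.update_nil_left]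
    exact hB.symm
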